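-- pv_equiv track=rewrite | github.com/cctbx/cctbx_project | simtbx/diffBragg/utils.py | nearest_non_zero
-- ===== SOURCE A (Python) =====
-- from itertools import zip_longest
--
-- def nearest_non_zero(lst, idx):
--     # https: // codereview.stackexchange.com / a / 172121 / 78230
--     if lst[idx] > 0:
--         return lst[idx]
--     before, after = lst[:idx], lst[idx+1:]
--     for b_val, a_val in zip_longest(reversed(before), after, fillvalue=0):
--         # N.B. I applied `reversed` inside `zip_longest` here. This
--         # ensures that `before` and `after` are the same type, and that
--         # `before + [lst[idx]] + after == lst`.
--         if b_val > 0: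
--             return b_val
--         if a_val > 0:
--             return a_val
--     else:
--         return 0  # all zeroes in this list
-- ===== SOURCE B (Python) =====
-- def _first_pos(seq):
--     # first strictly positive value in seq, with its offset (distance)
--     for d, v in enumerate(seq):
--         if v > 0:
--             return (d, v)
--     return None
--
-- def nearest_non_zero(lst, idx):
--     if lst[idx] > 0:
--         return lst[idx]
--     left = _first_pos(reversed(lst[:idx]))
--     right = _first_pos(lst[idx + 1:])
--     if left is None and right is None:
--         return 0
--     if right is None:
--         return left[1]
--     if left is None:
--         return right[1]
--     return left[1] if left[0] <= right[0] else right[1]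
-- ===== Notes on version B (the rewrite author's own statement) =====
-- stated objective: alternative
-- what changed: Replaces the lockstep zip_longest interleaved scan with two independent early-stopping first-positive searches (one per side) followed by an explicit distance comparison with left-wins tie-breaking.
import Mathlib
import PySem

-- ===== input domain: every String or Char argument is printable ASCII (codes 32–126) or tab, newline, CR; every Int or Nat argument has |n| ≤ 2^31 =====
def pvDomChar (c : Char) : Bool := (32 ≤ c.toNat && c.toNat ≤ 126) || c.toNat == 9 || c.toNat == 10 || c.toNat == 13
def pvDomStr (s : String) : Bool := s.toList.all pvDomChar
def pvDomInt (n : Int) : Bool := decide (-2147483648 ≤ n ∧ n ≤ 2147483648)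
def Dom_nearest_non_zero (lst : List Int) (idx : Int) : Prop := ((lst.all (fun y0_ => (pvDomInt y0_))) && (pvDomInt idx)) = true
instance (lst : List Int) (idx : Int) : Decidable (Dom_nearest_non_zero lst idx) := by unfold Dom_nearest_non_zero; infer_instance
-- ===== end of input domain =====

-- B replaces A's interleaved zip_longest scan with two independent first-positive
-- searches (one per side) plus an explicit distance comparison; no speed claim.


-- ===== PORT A =====
-- the zip_longest(reversed(before), after, fillvalue=0) loop, structurally:
def nnzLoop : List Int → List Int → Int
  | [], [] => 0
  | b :: bs, [] => if b > 0 then b else nnzLoop bs []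
  | [], a :: as => if a > 0 then a else nnzLoop [] as
  | b :: bs, a :: as => if b > 0 then b else if a > 0 then a else nnzLoop bs as

def nearest_non_zero (lst : List Int) (idx : Int) : Int :=
  match PySem.List.pyGet? lst idx with
  | none => 0  -- unreachable under Pre_ (Python raises IndexError)
  | some v =>
    if v > 0 then v
    else
      nnzLoop ((PySem.List.slice lst none (some idx)).reverse)
              (PySem.List.slice lst (some (idx + 1)) none)

-- ===== PORT B =====
-- first strictly positive value with its offset (Source B's _first_pos)
def firstPos : List Int → Option (Nat × Int)
  | [] => none
  | v :: rest => if v > 0 then some (0, v) else (firstPos rest).map (fun p => (p.1 + 1, p.2))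

-- Source B's final if-chain
def nnzCombine : Option (Nat × Int) → Option (Nat × Int) → Int
  | none, none => 0
  | some (_, b), none => b
  | none, some (_, a) => a
  | some (d, b), some (e, a) => if d ≤ e then b else a

def nearest_non_zero_alt (lst : List Int) (idx : Int) : Int :=
  match PySem.List.pyGet? lst idx with
  | none => 0  -- unreachable under Pre_ (Python raises IndexError)
  | some v =>
    if v > 0 then v
    else
      nnzCombine (firstPos ((PySem.List.slice lst none (some idx)).reverse))
                 (firstPos (PySem.List.slice lst (some (idx + 1)) none))

-- ===== PRECONDITION & SPEC =====
-- Pre_ excludes exactly the inputs where lst[idx] raises IndexError in Python.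
def Pre_nearest_non_zero (lst : List Int) (idx : Int) : Prop :=
  PySem.Raise.InRange lst.length idx
instance (lst : List Int) (idx : Int) : Decidable (Pre_nearest_non_zero lst idx) := by
  unfold Pre_nearest_non_zero; infer_instance

def pvWitness_nearest_non_zero : List Int × Int := ([0, 3, 0], 0)

def Spec_nearest_non_zero (lst : List Int) (idx : Int) (out : Int) : Prop := out = nearest_non_zero_alt lst idx
instance (lst : List Int) (idx : Int) (out : Int) : Decidable (Spec_nearest_non_zero lst idx out) := by unfold Spec_nearest_non_zero; infer_instance

-- ===== CLAIM (what is proved, stated in full; the proofs are below) =====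
def Claim_equal_nearest_non_zero : Prop := ∀ (lst : List Int) (idx : Int), Dom_nearest_non_zero lst idx → Pre_nearest_non_zero lst idx → Spec_nearest_non_zero lst idx (nearest_non_zero lst idx)

-- ===== LEMMAS AND PROOFS =====

theorem nnzCombine_shift (p q : Option (Nat × Int)) :
    nnzCombine (p.map (fun r => (r.1 + 1, r.2))) (q.map (fun r => (r.1 + 1, r.2)))
      = nnzCombine p q := by
  cases p <;> cases q <;> simp [nnzCombine]

theorem nnzLoop_nil_left (as : List Int) :
    nnzLoop [] as = nnzCombine none (firstPos as) := by
  induction as with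
  | nil => simp [nnzLoop, firstPos, nnzCombine]
  | cons a as ih =>
    by_cases ha : a > 0
    · simp [nnzLoop, firstPos, ha, nnzCombine]
    · simp only [nnzLoop, firstPos, ha, ite_false, ih]
      cases h : firstPos as <;> simp [nnzCombine]

theorem nnzLoop_nil_right (bs : List Int) :
    nnzLoop bs [] = nnzCombine (firstPos bs) none := by
  induction bs with
  | nil => simp [nnzLoop, firstPos, nnzCombine]
  | cons b bs ih =>
    by_cases hb : b > 0
    · simp [nnzLoop, firstPos, hb, nnzCombine]
    · simp only [nnzLoop, firstPos, hb, ite_false, ih]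
      cases h : firstPos bs <;> simp [nnzCombine]

theorem nnzLoop_eq_combine (bs as : List Int) :
    nnzLoop bs as = nnzCombine (firstPos bs) (firstPos as) := by
  induction bs generalizing as with
  | nil => exact nnzLoop_nil_left as
  | cons b bs ih =>
    cases as with
    | nil => exact nnzLoop_nil_right (b :: bs)
    | cons a as =>
      by_cases hb : b > 0
      · by_cases ha : a > 0
        · simp [nnzLoop, firstPos, hb, ha, nnzCombine]
        · simp only [nnzLoop, firstPos, hb, ha, ite_true, ite_false]
          cases h : firstPos as <;> simp [nnzCombine]
      · by_cases ha : a > 0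
        · simp only [nnzLoop, firstPos, hb, ha, ite_false, ite_true]
          cases h : firstPos bs <;> simp [nnzCombine]
        · simp only [nnzLoop, firstPos, hb, ha, ite_false, ih, nnzCombine_shift]

theorem nearest_non_zero_eq (lst : List Int) (idx : Int) :
    nearest_non_zero lst idx = nearest_non_zero_alt lst idx := by
  unfold nearest_non_zero nearest_non_zero_alt
  cases h : PySem.List.pyGet? lst idx with
  | none => rfl
  | some v =>
    by_cases hv : v > 0
    · simp [hv]
    · simp [hv, nnzLoop_eq_combine]

-- ===== VERDICT (by name: the statement is the Claim_ definition above) =====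
theorem nearest_non_zero_spec : Claim_equal_nearest_non_zero := by
  intro lst idx _ _
  unfold Spec_nearest_non_zero
  exact nearest_non_zero_eq lst idx
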